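-- pv_equiv track=rewrite | github.com/ueser/beyond-pattern-matching | primitive-evolution/blog_demos/experiments/evolve_with_mined_motifs.py | motifize_body
-- ===== SOURCE A (Python) =====
-- from typing import Dict, List, Tuple, Any, Optional
--
-- def motifize_body(body: str, key_map: Dict[str, str]) -> List[str]:
--     ordered = sorted(key_map.keys(), key=len, reverse=True)
--     out: List[str] = []
--     i = 0
--     n = len(body)
--     while i < n:
--         matched = False
--         for k in ordered:
--             if body.startswith(k, i):
--                 out.append(key_map[k])
--                 i += len(k)
--                 matched = True
--                 break
--         if not matched:
--             out.append(body[i])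
--             i += 1
--     return out
-- ===== SOURCE B (Python) =====
-- def motifize_body(body, key_map):
--     # No sorting: at each position scan the dict items once, keeping the
--     # strictly-longest matching key (ties keep the earliest-inserted key,
--     # which is exactly A's stable sorted-by-length-desc + first-match rule).
--     items = list(key_map.items())
--     out = []
--     i = 0
--     n = len(body)
--     while i < n:
--         best = None
--         for k, v in items:
--             if body.startswith(k, i) and (best is None or len(best[0]) < len(k)):
--                 best = (k, v)
--         if best is None:
--             out.append(body[i])
--             i += 1
--         else:
--             out.append(best[1])
--             i += len(best[0])
--     return out
-- ===== Notes on version B (the rewrite author's own statement) =====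
-- stated objective: alternative
-- what changed: A sorts the keys by length (descending, stable) once and at each body position takes the first sorted key that matches; B does no sorting at all and instead scans the dict items once per position keeping the strictly-longest match (ties keep the earliest-inserted key), which selects the same key.
import Mathlib
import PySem

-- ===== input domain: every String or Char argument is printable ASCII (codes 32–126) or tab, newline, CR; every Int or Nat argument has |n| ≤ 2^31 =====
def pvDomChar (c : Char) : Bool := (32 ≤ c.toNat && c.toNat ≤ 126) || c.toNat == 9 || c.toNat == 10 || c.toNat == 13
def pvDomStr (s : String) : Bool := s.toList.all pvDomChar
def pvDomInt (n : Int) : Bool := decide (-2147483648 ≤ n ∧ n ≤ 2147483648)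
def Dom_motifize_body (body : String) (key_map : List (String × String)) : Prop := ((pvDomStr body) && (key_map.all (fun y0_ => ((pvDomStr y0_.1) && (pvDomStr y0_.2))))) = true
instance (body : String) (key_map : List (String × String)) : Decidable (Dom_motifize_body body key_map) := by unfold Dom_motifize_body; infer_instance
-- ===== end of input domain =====

-- B replaces A's length-sorted key list and first-match scan by a sort-free pass over the
-- dict items that keeps the strictly-longest matching key (objective: alternative).

-- ===== PORT A =====
-- A's while-loop as fuelled recursion (fuel = |body| + 1; when every consumed key is
-- nonempty each step eats ≥ 1 char, matching Python's terminating runs); `rest` is body[i:].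
def pvLoopA (ordered : List String) (km : PySem.Dict String String) :
    Nat → List Char → List String → List String
  | 0, _, out => out
  | Nat.succ _, [], out => out
  | Nat.succ fuel, c :: rs, out =>
    match ordered.find? (fun k => PySem.Chars.startswith (c :: rs) k.toList) with
    | some k => pvLoopA ordered km fuel ((c :: rs).drop k.toList.length) (out ++ [km.getD k ""])
    | none => pvLoopA ordered km fuel rs (out ++ [String.ofList [c]])

def motifize_body (body : String) (key_map : List (String × String)) : List String :=
  let km := PySem.Dict.ofList key_map
  let ordered := PySem.List.sorted km.keys (fun s => PySem.Str.len s) true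
  pvLoopA ordered km (body.toList.length + 1) body.toList []

-- ===== PORT B =====
-- B's inner for-loop: the strictly-longest key of `items` matching at the current position
-- (ties keep the earlier item, since replacement needs a strictly greater length)
def pvBest (rest : List Char) (items : List (String × String)) : Option (String × String) :=
  items.foldl (fun best p =>
    if PySem.Chars.startswith rest p.1.toList &&
        (match best with
         | none => true
         | some q => decide (PySem.Str.len q.1 < PySem.Str.len p.1))
    then some p else best) none

-- B's while-loop, emitting the output front to back; same fuel guard as A's loop
def pvEmit (items : List (String × String)) : Nat → List Char → List String
  | 0, _ => []
  | Nat.succ _, [] => []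
  | Nat.succ fuel, c :: rs =>
    match pvBest (c :: rs) items with
    | none => String.ofList [c] :: pvEmit items fuel rs
    | some p => p.2 :: pvEmit items fuel ((c :: rs).drop p.1.toList.length)

def motifize_body_alt (body : String) (key_map : List (String × String)) : List String :=
  pvEmit (PySem.Dict.ofList key_map).items (body.toList.length + 1) body.toList

-- ===== PRECONDITION & SPEC =====
def Spec_motifize_body (body : String) (key_map : List (String × String)) (out : List String) : Prop := out = motifize_body_alt body key_map
instance (body : String) (key_map : List (String × String)) (out : List String) : Decidable (Spec_motifize_body body key_map out) := by unfold Spec_motifize_body; infer_instance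

-- ===== CLAIM (what is proved, stated in full; the proofs are below) =====
def Claim_equal_motifize_body : Prop := ∀ (body : String) (key_map : List (String × String)), Dom_motifize_body body key_map → Spec_motifize_body body key_map (motifize_body body key_map)

-- ===== LEMMAS AND PROOFS =====

-- one step of B's max-tracking scan, abstractly
def pvStep {α : Type} (P : α → Bool) (key : α → Int) (b : Option α) (x : α) : Option α :=
  if P x && (match b with | none => true | some y => decide (key y < key x)) then some x else b

-- left-biased "longer wins" combination of two optional candidates
def pvComb {α : Type} (key : α → Int) : Option α → Option α → Option α
  | a, none => a
  | none, some y => some y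
  | some x, some y => if key x < key y then some y else some x

theorem pvComb_none_right {α : Type} (key : α → Int) (a : Option α) :
    pvComb key a none = a := by cases a <;> rfl

theorem pvComb_none_left {α : Type} (key : α → Int) (b : Option α) :
    pvComb key none b = b := by cases b <;> rfl

theorem pvStep_eq_comb {α : Type} (P : α → Bool) (key : α → Int) (b : Option α) (x : α) :
    pvStep P key b x = pvComb key b (if P x then some x else none) := by
  cases b <;> cases hP : P x <;>
    simp only [pvStep, pvComb, hP, Bool.true_and, Bool.false_and, if_true, if_false,
      decide_eq_true_eq, Bool.false_eq_true] <;>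
    (try split_ifs) <;> simp_all

theorem pvComb_assoc {α : Type} (key : α → Int) (a b c : Option α) :
    pvComb key (pvComb key a b) c = pvComb key a (pvComb key b c) := by
  cases a <;> cases b <;> cases c <;>
    simp only [pvComb] <;> (try split_ifs) <;> (try simp only [pvComb]) <;> (try split_ifs) <;>
    first | rfl | (exfalso; omega)

-- running the scan from an arbitrary start combines the start with the scan from none
theorem pvFoldl_step_init {α : Type} (P : α → Bool) (key : α → Int) (l : List α) (b : Option α) :
    l.foldl (pvStep P key) b = pvComb key b (l.foldl (pvStep P key) none) := by
  induction l generalizing b with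
  | nil => simp [pvComb_none_right]
  | cons x l ih =>
    simp only [List.foldl_cons]
    rw [ih (pvStep P key b x), ih (pvStep P key none x),
        pvStep_eq_comb P key b x, pvStep_eq_comb P key none x,
        pvComb_none_left, pvComb_assoc]

-- inserting into a key-descending list: the first match afterwards is the "longer wins" pick
theorem pvFind_insertBy {α : Type} (P : α → Bool) (key : α → Int) (x : α) (s : List α)
    (hs : s.Pairwise (fun a b => key b ≤ key a)) :
    (PySem.List.insertBy (fun a b => decide (key b < key a)) x s).find? P
      = pvComb key (s.find? P) (if P x then some x else none) := by
  induction s with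
  | nil =>
    cases hP : P x <;>
      simp [PySem.List.insertBy, List.find?, hP, pvComb]
  | cons y t ih =>
    have hy : ∀ z ∈ t, key z ≤ key y := (List.pairwise_cons.mp hs).1
    have ht : t.Pairwise (fun a b => key b ≤ key a) := (List.pairwise_cons.mp hs).2
    by_cases hlt : key y < key x
    · -- x goes in front of y
      have : PySem.List.insertBy (fun a b => decide (key b < key a)) x (y :: t)
          = x :: y :: t := by simp [PySem.List.insertBy, hlt]
      rw [this]
      cases hP : P x with
      | false =>
        simp [List.find?, hP, pvComb_none_right]
      | true =>
        rw [List.find?_cons_of_pos hP]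
        simp only [if_true]
        cases hfind : (y :: t).find? P with
        | none => rfl
        | some z =>
          have hz : z ∈ y :: t := List.mem_of_find?_eq_some hfind
          have hzk : key z ≤ key y := by
            rcases List.mem_cons.mp hz with rfl | hz'
            · exact le_refl _
            · exact hy z hz'
          simp [pvComb, lt_of_le_of_lt hzk hlt]
    · -- x goes after y
      have : PySem.List.insertBy (fun a b => decide (key b < key a)) x (y :: t)
          = y :: PySem.List.insertBy (fun a b => decide (key b < key a)) x t := by
        simp [PySem.List.insertBy, hlt]
      rw [this]
      cases hPy : P y with
      | true =>
        rw [List.find?_cons_of_pos hPy, List.find?_cons_of_pos hPy]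
        cases hP : P x <;> simp [pvComb, hlt]
      | false =>
        rw [List.find?_cons_of_neg (by simp [hPy]), List.find?_cons_of_neg (by simp [hPy])]
        exact ih ht

-- insertBy for a descending key order preserves key-descending
theorem pvInsertBy_pairwise {α : Type} (key : α → Int) (x : α) (s : List α)
    (hs : s.Pairwise (fun a b => key b ≤ key a)) :
    (PySem.List.insertBy (fun a b => decide (key b < key a)) x s).Pairwise
      (fun a b => key b ≤ key a) := by
  induction s with
  | nil => simp [PySem.List.insertBy]
  | cons y t ih =>
    have hy : ∀ z ∈ t, key z ≤ key y := (List.pairwise_cons.mp hs).1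
    have ht : t.Pairwise (fun a b => key b ≤ key a) := (List.pairwise_cons.mp hs).2
    by_cases hlt : key y < key x
    · have : PySem.List.insertBy (fun a b => decide (key b < key a)) x (y :: t)
          = x :: y :: t := by simp [PySem.List.insertBy, hlt]
      rw [this]
      refine List.pairwise_cons.mpr ⟨?_, hs⟩
      intro z hz
      rcases List.mem_cons.mp hz with rfl | hz'
      · exact le_of_lt hlt
      · exact le_trans (hy z hz') (le_of_lt hlt)
    · have : PySem.List.insertBy (fun a b => decide (key b < key a)) x (y :: t)
          = y :: PySem.List.insertBy (fun a b => decide (key b < key a)) x t := by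
        simp [PySem.List.insertBy, hlt]
      rw [this]
      refine List.pairwise_cons.mpr ⟨?_, ih ht⟩
      intro z hz
      rcases (PySem.List.mem_insertBy _ _ _ _).mp hz with rfl | hz'
      · omega
      · exact hy z hz'

-- first match of the descending stable sort = B's strict-max scan
theorem pvFind_sorted_rev {α : Type} (P : α → Bool) (key : α → Int) (l : List α) :
    (PySem.List.sorted l key true).find? P = l.foldl (pvStep P key) none := by
  rw [PySem.List.sorted_rev_eq_foldl_insertBy]
  suffices h : ∀ (s : List α), s.Pairwise (fun a b => key b ≤ key a) →
      (l.foldl (fun acc x => PySem.List.insertBy (fun a b => decide (key b < key a)) x acc) s).find? P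
        = pvComb key (s.find? P) (l.foldl (pvStep P key) none) by
    have := h [] (by simp)
    rwa [List.find?_nil, pvComb_none_left] at this
  induction l with
  | nil => intro s _; simp [pvComb_none_right]
  | cons x l ih =>
    intro s hs
    simp only [List.foldl_cons]
    rw [ih _ (pvInsertBy_pairwise key x s hs), pvFind_insertBy P key x s hs,
        pvComb_assoc, pvFoldl_step_init P key l (pvStep P key none x),
        pvStep_eq_comb P key none x, pvComb_none_left]

-- the scan over mapped elements is the mapped scan
theorem pvFoldl_step_map {α β : Type} (P : α → Bool) (key : α → Int)
    (P' : β → Bool) (key' : β → Int) (g : α → β)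
    (hP : ∀ a, P' (g a) = P a) (hk : ∀ a, key' (g a) = key a)
    (l : List α) (b : Option α) :
    (l.map g).foldl (pvStep P' key') (b.map g) = (l.foldl (pvStep P key) b).map g := by
  induction l generalizing b with
  | nil => simp
  | cons x l ih =>
    simp only [List.map_cons, List.foldl_cons]
    rw [← ih (pvStep P key b x)]
    congr 1
    cases b <;> simp [pvStep, hP, hk, apply_ite (Option.map g)]

-- a dict's items are its keys paired with their looked-up values
theorem pvItems_eq_map_keys (km : PySem.Dict String String) (h : km.keys.Nodup) :
    km.items = km.keys.map (fun k => (k, km.getD k "")) := by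
  have : km.keys.map (fun k => (k, km.getD k "")) = km.items.map (fun p => (p.1, km.getD p.1 "")) := by
    simp [PySem.Dict.keys, List.map_map, Function.comp]
  rw [this]
  apply List.ext_getElem (by simp)
  intro i h1 h2
  simp only [List.getElem_map]
  have hmem : km.items[i] ∈ km.items := List.getElem_mem _
  have := PySem.Dict.getD_of_mem_items (d := km) (k := km.items[i].1) (v := km.items[i].2)
    (by simpa using hmem) h (d0 := "")
  simp [this]

-- per position: A's first match of the sorted keys = B's best item, paired with its value
theorem pvBest_eq_find (key_map : List (String × String)) (rest : List Char) :
    pvBest rest (PySem.Dict.ofList key_map).items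
      = ((PySem.List.sorted (PySem.Dict.ofList key_map).keys (fun s => PySem.Str.len s) true).find?
          (fun k => PySem.Chars.startswith rest k.toList)).map
          (fun k => (k, (PySem.Dict.ofList key_map).getD k "")) := by
  set km := PySem.Dict.ofList key_map with hkm
  have hbest : pvBest rest km.items
      = km.items.foldl (pvStep (fun p : String × String => PySem.Chars.startswith rest p.1.toList)
          (fun p : String × String => PySem.Str.len p.1)) none := by
    refine PySem.List.foldl_congr_mem _ _ _ _ (fun b p _ => ?_)
    cases b <;> rfl
  rw [pvFind_sorted_rev]
  have hitems : km.items = km.keys.map (fun k => (k, km.getD k "")) :=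
    pvItems_eq_map_keys km (by rw [hkm]; exact PySem.Dict.nodup_keys_ofList key_map)
  have hfold := pvFoldl_step_map
    (P := fun k => PySem.Chars.startswith rest k.toList)
    (key := fun s => PySem.Str.len s)
    (P' := fun p : String × String => PySem.Chars.startswith rest p.1.toList)
    (key' := fun p : String × String => PySem.Str.len p.1)
    (g := fun k => (k, km.getD k ""))
    (fun _ => rfl) (fun _ => rfl) km.keys none
  rw [hbest, hitems]
  exact hfold

-- the two while-loops produce the same tokens, given the per-position agreement
theorem pvLoops_eq (ordered : List String) (km : PySem.Dict String String)
    (hfind : ∀ (c : Char) (rs : List Char),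
      pvBest (c :: rs) km.items
        = ((ordered.find? (fun k => PySem.Chars.startswith (c :: rs) k.toList)).map
            (fun k => (k, km.getD k ""))))
    (fuel : Nat) (rest : List Char) (out : List String) :
    pvLoopA ordered km fuel rest out = out ++ pvEmit km.items fuel rest := by
  induction fuel generalizing rest out with
  | zero => simp [pvLoopA, pvEmit]
  | succ fuel ih =>
    cases rest with
    | nil => simp [pvLoopA, pvEmit]
    | cons c rs =>
      rw [pvLoopA, pvEmit, hfind c rs]
      cases hA : ordered.find? (fun k => PySem.Chars.startswith (c :: rs) k.toList) with
      | none => simp [ih]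
      | some k => simp [ih]

-- ===== VERDICT (by name: the statement is the Claim_ definition above) =====
theorem motifize_body_spec : Claim_equal_motifize_body := by
  intro body key_map _
  unfold Spec_motifize_body motifize_body motifize_body_alt
  simpa using pvLoops_eq
    (PySem.List.sorted (PySem.Dict.ofList key_map).keys (fun s => PySem.Str.len s) true)
    (PySem.Dict.ofList key_map)
    (fun c rs => pvBest_eq_find key_map (c :: rs))
    (body.toList.length + 1) body.toList []
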